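-- pv_equiv track=rewrite | github.com/cusoiv/genome_sweeps | metagenome_clonal_frame/clonal_frame_calling_clean/phybreak8.core_to_cf.py | find_consensus_seq
-- ===== SOURCE A (Python) =====
-- def find_consensus_seq(msa_dict):
-- 	nt_dict = {}
--
--
-- 	for strain in msa_dict:
-- #		print (strain)
-- 		seq = msa_dict[strain]
-- 		for i in range(0,len(seq)):
--
-- 			try:
-- 				nt_dict[i]  #if nt_dict[i] exists
-- 			except:
-- 				nt_dict[i] = {'N':0,'?':0,'A':0,'T':0,'G':0,'C':0}
-- 			nt = seq[i]
-- 			if nt == '?':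
-- 				nt_dict[i]['?'] += 1
-- 			elif nt == 'N':
-- 				nt_dict[i]['N'] += 1
-- 			elif nt == 'A':
-- 				nt_dict[i]['A'] += 1
-- 			elif nt == 'T':
-- 				nt_dict[i]['T'] += 1
-- 			elif nt == 'G':
-- 				nt_dict[i]['G'] += 1
-- 			elif nt == 'C':
-- 				nt_dict[i]['C'] += 1
-- 	consensus_seq=""
-- 	for i in nt_dict:
-- 		sn=0
-- 		for l in 'ATGC':
-- 			sn=sn+nt_dict[i][l]
-- 		if sn==sum(nt_dict[i].values()):#When there is no recombination in any of the genomes involved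
-- 			consensus_seq=consensus_seq+max(nt_dict[i],key=nt_dict[i].get)
--
-- 	return consensus_seq
-- ===== SOURCE B (Python) =====
-- def find_consensus_seq(msa_dict):
--     seqs = list(msa_dict.values())
--     L = 0
--     for s in seqs:
--         L = max(L, len(s))
--     out = []
--     for i in range(L):
--         counts = {'N': 0, '?': 0, 'A': 0, 'T': 0, 'G': 0, 'C': 0}
--         for seq in seqs:
--             if i < len(seq) and seq[i] in counts:
--                 counts[seq[i]] += 1
--         if counts['N'] == 0 and counts['?'] == 0:
--             out.append(max(counts, key=counts.get))
--     return "".join(out)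
-- ===== Notes on version B (the rewrite author's own statement) =====
-- stated objective: idiomatic
-- what changed: B computes the consensus column-major: it takes the max sequence length, then for each column gathers that column's characters across all sequences into one fresh counter and tests 'no N and no ?' directly, instead of A's row-major pass that builds a dict of per-column count-dicts keyed by position and then re-derives the condition from an ATGC-sum-vs-total-sum comparison.
import Mathlib
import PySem

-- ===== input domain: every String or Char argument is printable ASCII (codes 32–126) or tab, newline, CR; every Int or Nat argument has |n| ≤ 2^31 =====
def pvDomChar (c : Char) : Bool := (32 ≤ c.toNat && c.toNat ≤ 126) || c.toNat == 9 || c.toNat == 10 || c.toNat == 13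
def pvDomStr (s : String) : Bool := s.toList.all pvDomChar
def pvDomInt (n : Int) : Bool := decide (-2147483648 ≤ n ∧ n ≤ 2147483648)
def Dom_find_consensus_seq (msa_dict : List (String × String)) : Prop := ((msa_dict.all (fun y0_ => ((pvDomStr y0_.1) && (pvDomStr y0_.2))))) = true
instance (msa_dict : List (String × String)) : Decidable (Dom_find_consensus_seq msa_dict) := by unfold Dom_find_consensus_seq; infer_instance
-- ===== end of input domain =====

-- B rebuilds the consensus column-major (one fresh counter per column over the transpose) instead
-- of A's row-major dict-of-dicts accumulation; measured constant-factor faster in a timing run.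

-- ===== PORT A =====
-- the Python dict argument, built from the association list (later duplicates overwrite in place)
def pvToDict (l : List (String × String)) : PySem.Dict String String :=
  l.foldl (fun d p => d.insert p.1 p.2) PySem.Dict.empty

-- {'N':0,'?':0,'A':0,'T':0,'G':0,'C':0}
def pvFresh : PySem.Dict Char Int :=
  ⟨[('N', 0), ('?', 0), ('A', 0), ('T', 0), ('G', 0), ('C', 0)]⟩

-- the if/elif chain incrementing one entry of the per-column counter
def pvBump (cnt : PySem.Dict Char Int) (nt : Char) : PySem.Dict Char Int :=
  if nt == '?' then cnt.modify '?' 0 (· + 1)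
  else if nt == 'N' then cnt.modify 'N' 0 (· + 1)
  else if nt == 'A' then cnt.modify 'A' 0 (· + 1)
  else if nt == 'T' then cnt.modify 'T' 0 (· + 1)
  else if nt == 'G' then cnt.modify 'G' 0 (· + 1)
  else if nt == 'C' then cnt.modify 'C' 0 (· + 1)
  else cnt

def find_consensus_seq (msa_dict : List (String × String)) : String :=
  let d := pvToDict msa_dict
  let nt_dict : PySem.Dict Int (PySem.Dict Char Int) :=
    d.keys.foldl (fun ntd strain =>
      let seq := (d.getD strain "").toList
      (PySem.List.pyRange 0 (seq.length : Int)).foldl (fun ntd i =>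
        -- try nt_dict[i] / except: initialize
        let ntd := if ntd.contains i then ntd else ntd.insert i pvFresh
        ntd.modify i pvFresh (fun cnt => pvBump cnt ((PySem.List.pyGet? seq i).getD ' '))) ntd)
      PySem.Dict.empty
  String.mk (nt_dict.keys.foldl (fun acc i =>
    let cnt := nt_dict.getD i pvFresh
    let sn := ("ATGC".toList).foldl (fun s l => s + cnt.getD l 0) 0
    if sn == cnt.values.sum
    then acc ++ [PySem.List.maxD cnt.keys (fun k => cnt.getD k 0) 'N']
    else acc) [])

-- ===== PORT B =====
-- count the characters of column i (transpose access), skipping short rows and foreign characters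
def pvColCounts (seqs : List (List Char)) (i : Nat) : PySem.Dict Char Int :=
  seqs.foldl (fun cnt seq =>
    if i < seq.length && cnt.contains (seq.getD i ' ')
    then cnt.modify (seq.getD i ' ') 0 (· + 1) else cnt) pvFresh

def find_consensus_seq_alt (msa_dict : List (String × String)) : String :=
  let d := pvToDict msa_dict
  let seqs := d.values.map String.toList
  let L := seqs.foldl (fun m s => max m s.length) 0
  String.mk ((List.range L).foldl (fun acc i =>
    let cnt := pvColCounts seqs i
    if cnt.getD 'N' 0 == 0 && cnt.getD '?' 0 == 0
    then acc ++ [PySem.List.maxD cnt.keys (fun k => cnt.getD k 0) 'N']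
    else acc) [])

-- ===== PRECONDITION & SPEC =====
def Spec_find_consensus_seq (msa_dict : List (String × String)) (out : String) : Prop := out = find_consensus_seq_alt msa_dict
instance (msa_dict : List (String × String)) (out : String) : Decidable (Spec_find_consensus_seq msa_dict out) := by unfold Spec_find_consensus_seq; infer_instance

-- ===== CLAIM (what is proved, stated in full; the proofs are below) =====
def Claim_equal_find_consensus_seq : Prop := ∀ (msa_dict : List (String × String)), Dom_find_consensus_seq msa_dict → Spec_find_consensus_seq msa_dict (find_consensus_seq msa_dict)

-- ===== LEMMAS AND PROOFS =====

-- tuple abstraction of the six-key counter dict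
def CntT : Type := Int × Int × Int × Int × Int × Int

def mkC (t : CntT) : PySem.Dict Char Int :=
  ⟨[('N', t.1), ('?', t.2.1), ('A', t.2.2.1), ('T', t.2.2.2.1), ('G', t.2.2.2.2.1), ('C', t.2.2.2.2.2)]⟩

def zeroT : CntT := (0, 0, 0, 0, 0, 0)

def bumpT (t : CntT) (c : Char) : CntT :=
  if c = '?' then (t.1, t.2.1 + 1, t.2.2)
  else if c = 'N' then (t.1 + 1, t.2)
  else if c = 'A' then (t.1, t.2.1, t.2.2.1 + 1, t.2.2.2)
  else if c = 'T' then (t.1, t.2.1, t.2.2.1, t.2.2.2.1 + 1, t.2.2.2.2)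
  else if c = 'G' then (t.1, t.2.1, t.2.2.1, t.2.2.2.1, t.2.2.2.2.1 + 1, t.2.2.2.2.2)
  else if c = 'C' then (t.1, t.2.1, t.2.2.1, t.2.2.2.1, t.2.2.2.2.1, t.2.2.2.2.2 + 1)
  else t

lemma bump_mk (t : CntT) (c : Char) : pvBump (mkC t) c = mkC (bumpT t c) := by
  obtain ⟨n, q, a, b, g, k⟩ := t
  by_cases h1 : c = 'N'
  · subst h1; simp [pvBump, bumpT, mkC, PySem.Dict.modify, PySem.Dict.insert,
      PySem.Dict.contains, PySem.Dict.getD, PySem.Dict.get?]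
  by_cases h2 : c = '?'
  · subst h2; simp [pvBump, bumpT, mkC, PySem.Dict.modify, PySem.Dict.insert,
      PySem.Dict.contains, PySem.Dict.getD, PySem.Dict.get?]
  by_cases h3 : c = 'A'
  · subst h3; simp [pvBump, bumpT, mkC, PySem.Dict.modify, PySem.Dict.insert,
      PySem.Dict.contains, PySem.Dict.getD, PySem.Dict.get?]
  by_cases h4 : c = 'T'
  · subst h4; simp [pvBump, bumpT, mkC, PySem.Dict.modify, PySem.Dict.insert,
      PySem.Dict.contains, PySem.Dict.getD, PySem.Dict.get?]
  by_cases h5 : c = 'G'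
  · subst h5; simp [pvBump, bumpT, mkC, PySem.Dict.modify, PySem.Dict.insert,
      PySem.Dict.contains, PySem.Dict.getD, PySem.Dict.get?]
  by_cases h6 : c = 'C'
  · subst h6; simp [pvBump, bumpT, mkC, PySem.Dict.modify, PySem.Dict.insert,
      PySem.Dict.contains, PySem.Dict.getD, PySem.Dict.get?]
  · simp [pvBump, bumpT, h1, h2, h3, h4, h5, h6]

lemma bstep_mk (t : CntT) (c : Char) :
    (if (mkC t).contains c then (mkC t).modify c 0 (· + 1) else mkC t) = mkC (bumpT t c) := by
  obtain ⟨n, q, a, b, g, k⟩ := t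
  by_cases h1 : c = 'N'
  · subst h1; simp [bumpT, mkC, PySem.Dict.modify, PySem.Dict.insert,
      PySem.Dict.contains, PySem.Dict.getD, PySem.Dict.get?]
  by_cases h2 : c = '?'
  · subst h2; simp [bumpT, mkC, PySem.Dict.modify, PySem.Dict.insert,
      PySem.Dict.contains, PySem.Dict.getD, PySem.Dict.get?]
  by_cases h3 : c = 'A'
  · subst h3; simp [bumpT, mkC, PySem.Dict.modify, PySem.Dict.insert,
      PySem.Dict.contains, PySem.Dict.getD, PySem.Dict.get?]
  by_cases h4 : c = 'T'
  · subst h4; simp [bumpT, mkC, PySem.Dict.modify, PySem.Dict.insert,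
      PySem.Dict.contains, PySem.Dict.getD, PySem.Dict.get?]
  by_cases h5 : c = 'G'
  · subst h5; simp [bumpT, mkC, PySem.Dict.modify, PySem.Dict.insert,
      PySem.Dict.contains, PySem.Dict.getD, PySem.Dict.get?]
  by_cases h6 : c = 'C'
  · subst h6; simp [bumpT, mkC, PySem.Dict.modify, PySem.Dict.insert,
      PySem.Dict.contains, PySem.Dict.getD, PySem.Dict.get?]
  · have hcont : (mkC (n, q, a, b, g, k)).contains c = false := by
      simp only [mkC, PySem.Dict.contains, List.any_cons, List.any_nil, Bool.or_false,
        Bool.or_eq_false_iff, beq_eq_false_iff_ne, ne_eq]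
      exact ⟨fun h => h1 h.symm, fun h => h2 h.symm, fun h => h3 h.symm,
        fun h => h4 h.symm, fun h => h5 h.symm, fun h => h6 h.symm⟩
    simp [hcont, bumpT, h1, h2, h3, h4, h5, h6]

-- per-column tuple counter over a list of rows, from seed t
def colFrom (seqs : List (List Char)) (i : Nat) (t : CntT) : CntT :=
  seqs.foldl (fun t s => if i < s.length then bumpT t (s.getD i ' ') else t) t

def colT (seqs : List (List Char)) (i : Nat) : CntT := colFrom seqs i zeroT

lemma colCounts_eq (seqs : List (List Char)) (i : Nat) :
    pvColCounts seqs i = mkC (colT seqs i) := by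
  suffices h : ∀ t, seqs.foldl (fun cnt seq =>
      if i < seq.length && cnt.contains (seq.getD i ' ')
      then cnt.modify (seq.getD i ' ') 0 (· + 1) else cnt) (mkC t) = mkC (colFrom seqs i t) by
    have h0 : pvFresh = mkC zeroT := rfl
    unfold pvColCounts colT
    rw [h0]; exact h zeroT
  induction seqs with
  | nil => intro t; simp [colFrom]
  | cons s rest ih =>
    intro t
    simp only [List.foldl_cons]
    by_cases hl : i < s.length
    · have hhead : (if i < s.length && (mkC t).contains (s.getD i ' ')
          then (mkC t).modify (s.getD i ' ') 0 (· + 1) else mkC t)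
            = mkC (bumpT t (s.getD i ' ')) := by
        rw [← bstep_mk]; simp [hl]
      rw [hhead, ih]
      simp only [colFrom, List.foldl_cons, if_pos hl]
    · rw [if_neg (by simp [hl]), ih]
      simp only [colFrom, List.foldl_cons, if_neg hl]

-- the state of A's first loop: keys 0..K-1 in order, values per-column counters
def mkNt (K : Nat) (f : Nat → CntT) : PySem.Dict Int (PySem.Dict Char Int) :=
  ⟨(List.range K).map (fun i : Nat => ((i : Int), mkC (f i)))⟩

lemma mkNt_congr {K : Nat} {f g : Nat → CntT} (h : ∀ i < K, f i = g i) : mkNt K f = mkNt K g := by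
  apply PySem.Dict.ext
  simp only [mkNt]
  exact List.map_congr_left (fun i hi => by rw [h i (List.mem_range.mp hi)])

lemma contains_mkNt (K : Nat) (f : Nat → CntT) (m : Nat) :
    (mkNt K f).contains (m : Int) = decide (m < K) := by
  rcases Nat.lt_or_ge m K with h | h
  · have hc : (mkNt K f).contains (m : Int) = true := by
      simp only [mkNt, PySem.Dict.contains, List.any_eq_true]
      exact ⟨((m : Int), mkC (f m)), List.mem_map.mpr ⟨m, List.mem_range.mpr h, rfl⟩, by simp⟩
    rw [hc, decide_eq_true h]
  · have hc : (mkNt K f).contains (m : Int) = false := by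
      simp only [mkNt, PySem.Dict.contains, List.any_eq_false]
      intro p hp
      obtain ⟨i, hi, rfl⟩ := List.mem_map.mp hp
      rw [List.mem_range] at hi
      simp only [beq_iff_eq, Int.natCast_inj]
      omega
    rw [hc, decide_eq_false (by omega)]

lemma find?_mkNt (K : Nat) (f : Nat → CntT) (m : Nat) (h : m < K) :
    List.find? (fun p => p.1 == (m : Int))
        ((List.range K).map (fun i : Nat => ((i : Int), mkC (f i))))
      = some ((m : Int), mkC (f m)) := by
  induction K with
  | zero => omega
  | succ K ih =>
    rw [List.range_succ, List.map_append, List.find?_append]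
    by_cases hm : m < K
    · rw [ih hm]; rfl
    · have hmK : m = K := by omega
      subst hmK
      have hnone : List.find? (fun p => p.1 == (m : Int))
          ((List.range m).map (fun i : Nat => ((i : Int), mkC (f i)))) = none := by
        rw [List.find?_eq_none]
        intro x hx
        obtain ⟨i, hi, rfl⟩ := List.mem_map.mp hx
        rw [List.mem_range] at hi
        simp only [beq_iff_eq, Int.natCast_inj]
        omega
      rw [hnone]
      simp

lemma getD_mkNt (K : Nat) (f : Nat → CntT) (m : Nat) (h : m < K) (d : PySem.Dict Char Int) :
    (mkNt K f).getD (m : Int) d = mkC (f m) := by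
  have hget : (mkNt K f).get? (m : Int) = some (mkC (f m)) := by
    simp only [PySem.Dict.get?, mkNt, find?_mkNt K f m h, Option.map_some]
  simp [PySem.Dict.getD, hget]

lemma modify_mkNt (K : Nat) (f : Nat → CntT) (m : Nat) (h : m < K) (c : Char) :
    (mkNt K f).modify (m : Int) pvFresh (fun cnt => pvBump cnt c)
      = mkNt K (fun i => if i = m then bumpT (f i) c else f i) := by
  have hc : (mkNt K f).contains (m : Int) = true := by rw [contains_mkNt]; simpa
  apply PySem.Dict.ext
  simp only [PySem.Dict.modify, PySem.Dict.insert, hc, if_true,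
    getD_mkNt K f m h, bump_mk]
  simp only [mkNt, List.map_map]
  apply List.map_congr_left
  intro i hi
  rw [List.mem_range] at hi
  by_cases him : i = m
  · subst him; simp [Function.comp]
  · have hbe : ((i : Int) == (m : Int)) = false := by
      simp only [beq_eq_false_iff_ne, ne_eq, Int.natCast_inj]; exact him
    simp [Function.comp, hbe, him]

lemma insert_mkNt (K : Nat) (f : Nat → CntT) :
    (mkNt K f).insert (K : Int) pvFresh
      = mkNt (K + 1) (fun i => if i < K then f i else zeroT) := by
  have hc : (mkNt K f).contains (K : Int) = false := by rw [contains_mkNt]; simp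
  apply PySem.Dict.ext
  simp only [PySem.Dict.insert, hc, Bool.false_eq_true, if_false]
  show (mkNt K f).items ++ [((K : Int), pvFresh)] = _
  simp only [mkNt, List.range_succ, List.map_append]
  congr 1
  · apply List.map_congr_left
    intro i hi
    rw [List.mem_range] at hi
    simp [hi]
  · simp [show pvFresh = mkC zeroT from rfl]

-- one row: A's inner loop over range(len(seq))
lemma inner_loop (s : List Char) (m : Nat) : ∀ (K : Nat) (f : Nat → CntT),
    (List.range m).foldl (fun ntd (j : Nat) =>
        (if ntd.contains (j : Int) then ntd else ntd.insert (j : Int) pvFresh).modify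
          (j : Int) pvFresh (fun cnt => pvBump cnt (s.getD j ' '))) (mkNt K f)
      = mkNt (max K m) (fun i =>
          if i < m then bumpT (if i < K then f i else zeroT) (s.getD i ' ') else f i) := by
  induction m with
  | zero =>
    intro K f
    simp only [List.range_zero, List.foldl_nil, Nat.max_zero]
    exact (mkNt_congr (fun i hi => by simp)).symm
  | succ m ih =>
    intro K f
    rw [List.range_succ, List.foldl_append, ih K f, List.foldl_cons, List.foldl_nil]
    set g : Nat → CntT :=
      fun i => if i < m then bumpT (if i < K then f i else zeroT) (s.getD i ' ') else f i with hg
    by_cases hK : m < K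
    · have hmax : max K m = K := by omega
      rw [hmax]
      have hcont : (mkNt K g).contains (m : Int) = true := by
        rw [contains_mkNt]; simpa
      rw [if_pos hcont, modify_mkNt K g m hK]
      have hmax2 : max K (m + 1) = K := by omega
      rw [hmax2]
      apply mkNt_congr
      intro i hi
      by_cases him : i = m
      · subst him; simp [hg, hK]
      · by_cases hilt : i < m
        · simp [hg, him, hilt, Nat.lt_succ_of_lt hilt]
        · have : ¬ i < m + 1 := by omega
          simp [hg, him, hilt, this]
    · have hmax : max K m = m := by omega
      rw [hmax]
      have hcont : (mkNt m g).contains (m : Int) = false := by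
        rw [contains_mkNt]; simp
      rw [if_neg (by simp [hcont]), insert_mkNt m g,
        modify_mkNt (m + 1) _ m (by omega)]
      have hmax2 : max K (m + 1) = m + 1 := by omega
      rw [hmax2]
      apply mkNt_congr
      intro i hi
      by_cases him : i = m
      · subst him
        have : ¬ i < K := by omega
        simp [hg, this]
      · have hilt : i < m := by omega
        have hsucc : i < m + 1 := by omega
        simp [hg, him, hilt, hsucc]

-- all rows: A's first loop builds exactly the per-column counters in key order 0..L-1
lemma phase1 (seqs : List (List Char)) : ∀ (K : Nat) (f : Nat → CntT),
    seqs.foldl (fun ntd seq =>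
        (List.range seq.length).foldl (fun ntd (j : Nat) =>
          (if ntd.contains (j : Int) then ntd else ntd.insert (j : Int) pvFresh).modify
            (j : Int) pvFresh (fun cnt => pvBump cnt (seq.getD j ' '))) ntd) (mkNt K f)
      = mkNt (seqs.foldl (fun k s => max k s.length) K)
          (fun i => colFrom seqs i (if i < K then f i else zeroT)) := by
  induction seqs with
  | nil =>
    intro K f
    simp only [List.foldl_nil]
    apply mkNt_congr
    intro i hi
    simp [colFrom, hi]
  | cons s rest ih =>
    intro K f
    simp only [List.foldl_cons]
    rw [inner_loop s s.length K f, ih]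
    apply mkNt_congr
    intro i hi
    simp only [colFrom, List.foldl_cons]
    by_cases hl : i < s.length
    · have hi2 : i < max K s.length := by omega
      simp [hl, hi2]
    · simp only [hl, if_false]
      by_cases hiK : i < max K s.length
      · have hK : i < K := by omega
        simp [hiK, hK]
      · have hK : ¬ i < K := by omega
        simp [hiK, hK]

lemma bumpT_nonneg (t : CntT) (c : Char) (h1 : 0 ≤ t.1) (h2 : 0 ≤ t.2.1) :
    0 ≤ (bumpT t c).1 ∧ 0 ≤ (bumpT t c).2.1 := by
  obtain ⟨n, q, a, b, g, k⟩ := t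
  unfold bumpT
  split_ifs <;> refine ⟨?_, ?_⟩ <;> dsimp only at * <;> omega

-- the N and ? slots of the per-column counters are nonnegative
lemma colFrom_nonneg (seqs : List (List Char)) (i : Nat) :
    ∀ t : CntT, 0 ≤ t.1 → 0 ≤ t.2.1 → 0 ≤ (colFrom seqs i t).1 ∧ 0 ≤ (colFrom seqs i t).2.1 := by
  induction seqs with
  | nil => intro t h1 h2; exact ⟨h1, h2⟩
  | cons s rest ih =>
    intro t h1 h2
    simp only [colFrom, List.foldl_cons] at *
    by_cases hl : i < s.length
    · simp only [hl, if_true]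
      obtain ⟨hb1, hb2⟩ := bumpT_nonneg t (s.getD i ' ') h1 h2
      exact ih _ hb1 hb2
    · simp only [hl, if_false]
      exact ih t h1 h2

lemma colT_nonneg (seqs : List (List Char)) (i : Nat) :
    0 ≤ (colT seqs i).1 ∧ 0 ≤ (colT seqs i).2.1 :=
  colFrom_nonneg seqs i zeroT (by norm_num [zeroT]) (by norm_num [zeroT])

-- column inclusion: A's "ATGC sum equals total" test equals B's "no N and no ?" test
lemma cond_eq (seqs : List (List Char)) (i : Nat) :
    ((("ATGC".toList).foldl (fun s l => s + (mkC (colT seqs i)).getD l 0) 0)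
        == (mkC (colT seqs i)).values.sum)
      = ((mkC (colT seqs i)).getD 'N' 0 == 0 && (mkC (colT seqs i)).getD '?' 0 == 0) := by
  obtain ⟨hn, hq⟩ := colT_nonneg seqs i
  set t := colT seqs i with ht
  obtain ⟨n, q, a, b, g, k⟩ := t
  simp only at hn hq
  show ((0 + a + b + g + k : Int) == n + (q + (a + (b + (g + (k + 0))))))
      = ((n == 0) && (q == 0))
  have e1 : ((0 + a + b + g + k : Int) == n + (q + (a + (b + (g + (k + 0))))))
      = decide (n + q = 0) := by
    rw [Bool.eq_iff_iff]
    simp only [beq_iff_eq, decide_eq_true_eq]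
    omega
  have e2 : ((n == 0) && (q == 0)) = decide (n + q = 0) := by
    rw [Bool.eq_iff_iff]
    simp only [Bool.and_eq_true, beq_iff_eq, decide_eq_true_eq]
    omega
  rw [e1, e2]

-- ===== VERDICT (by name: the statement is the Claim_ definition above) =====
theorem find_consensus_seq_spec : Claim_equal_find_consensus_seq := by
  intro msa_dict _
  unfold Spec_find_consensus_seq
  simp only [find_consensus_seq, find_consensus_seq_alt]
  set d := pvToDict msa_dict with hd
  have hnodup : d.keys.Nodup := by
    rw [hd]
    unfold pvToDict
    exact PySem.Dict.nodup_keys_foldl_insert_key msa_dict (fun p => p.1) (fun _ p => p.2)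
      PySem.Dict.empty (by simp [PySem.Dict.keys, PySem.Dict.empty])
  have hvals : List.map String.toList d.values
      = d.keys.map (fun k => (d.getD k "").toList) := by
    rw [PySem.Dict.values_eq_map_keys d hnodup "", List.map_map]
    rfl
  rw [hvals]
  set seqs : List (List Char) := d.keys.map (fun k => (d.getD k "").toList) with hs
  have hA1 : List.foldl (fun (ntd : PySem.Dict Int (PySem.Dict Char Int)) strain =>
      List.foldl (fun ntd i =>
          (if ntd.contains i then ntd else ntd.insert i pvFresh).modify i pvFresh
            fun cnt => pvBump cnt ((PySem.List.pyGet? ((d.getD strain "").toList) i).getD ' '))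
        ntd (PySem.List.pyRange 0 ((d.getD strain "").toList.length : Int)))
      PySem.Dict.empty d.keys
      = mkNt (seqs.foldl (fun k s => max k s.length) 0) (fun i => colT seqs i) := by
    have hstep : ∀ (ntd : PySem.Dict Int (PySem.Dict Char Int)) (seq : List Char),
        List.foldl (fun ntd i =>
            (if ntd.contains i then ntd else ntd.insert i pvFresh).modify i pvFresh
              fun cnt => pvBump cnt ((PySem.List.pyGet? seq i).getD ' '))
          ntd (PySem.List.pyRange 0 (seq.length : Int))
        = List.foldl (fun ntd (j : Nat) =>
            (if ntd.contains (j : Int) then ntd else ntd.insert (j : Int) pvFresh).modify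
              (j : Int) pvFresh fun cnt => pvBump cnt (seq.getD j ' '))
          ntd (List.range seq.length) := by
      intro ntd seq
      rw [PySem.List.pyRange_zero_natCast, List.foldl_map]
      apply PySem.List.foldl_congr_mem
      intro acc j hj
      rw [List.mem_range] at hj
      rw [PySem.List.pyGet?_natCast, ← List.getD_eq_getElem?_getD]
    have e1 : List.foldl (fun (ntd : PySem.Dict Int (PySem.Dict Char Int)) strain =>
        List.foldl (fun ntd i =>
            (if ntd.contains i then ntd else ntd.insert i pvFresh).modify i pvFresh
              fun cnt => pvBump cnt ((PySem.List.pyGet? ((d.getD strain "").toList) i).getD ' '))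
          ntd (PySem.List.pyRange 0 ((d.getD strain "").toList.length : Int)))
        PySem.Dict.empty d.keys
        = List.foldl (fun (ntd : PySem.Dict Int (PySem.Dict Char Int)) strain =>
            List.foldl (fun ntd (j : Nat) =>
              (if ntd.contains (j : Int) then ntd else ntd.insert (j : Int) pvFresh).modify
                (j : Int) pvFresh
                  fun cnt => pvBump cnt (((d.getD strain "").toList).getD j ' '))
            ntd (List.range ((d.getD strain "").toList.length)))
          PySem.Dict.empty d.keys := by
      apply PySem.List.foldl_congr_mem
      intro acc strain _
      exact hstep acc ((d.getD strain "").toList)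
    have e2 : List.foldl (fun (ntd : PySem.Dict Int (PySem.Dict Char Int)) seq =>
            List.foldl (fun ntd (j : Nat) =>
              (if ntd.contains (j : Int) then ntd else ntd.insert (j : Int) pvFresh).modify
                (j : Int) pvFresh fun cnt => pvBump cnt (seq.getD j ' '))
            ntd (List.range seq.length))
          PySem.Dict.empty seqs
        = List.foldl (fun (ntd : PySem.Dict Int (PySem.Dict Char Int)) strain =>
            List.foldl (fun ntd (j : Nat) =>
              (if ntd.contains (j : Int) then ntd else ntd.insert (j : Int) pvFresh).modify
                (j : Int) pvFresh
                  fun cnt => pvBump cnt (((d.getD strain "").toList).getD j ' '))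
            ntd (List.range ((d.getD strain "").toList.length)))
          PySem.Dict.empty d.keys := by
      rw [hs]
      exact List.foldl_map
    rw [e1, ← e2]
    have h0 : (PySem.Dict.empty : PySem.Dict Int (PySem.Dict Char Int))
        = mkNt 0 (fun _ => zeroT) := rfl
    rw [h0, phase1 seqs 0 (fun _ => zeroT)]
    apply mkNt_congr
    intro i _
    simp [colT]
  rw [hA1]
  set L := seqs.foldl (fun k s => max k s.length) 0 with hL
  have hkeys : (mkNt L (fun i => colT seqs i)).keys
      = (List.range L).map (fun i : Nat => (i : Int)) := by
    simp only [mkNt, PySem.Dict.keys, List.map_map]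
    rfl
  rw [hkeys, List.foldl_map]
  congr 1
  apply PySem.List.foldl_congr_mem
  intro acc i hi
  rw [List.mem_range] at hi
  rw [getD_mkNt L (fun i => colT seqs i) i hi, colCounts_eq seqs i, cond_eq seqs i]
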